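-- pv_equiv track=rewrite | github.com/browjor/c231_functions | kasiski_and_IC.py | split_string_into_columns
-- ===== SOURCE A (Python) =====
-- def split_string_into_columns(string, key_size):
--     string_dict = {}
--     for i in range(1, key_size+1):
--         string_dict[i] = ""
--     for i in range(0, len(string)):
--         if (i+1)%key_size == 0:
--             string_dict[key_size] += string[i]
--         else:
--             string_dict[(i+1)%key_size] += string[i]
--     return string_dict
-- ===== SOURCE B (Python) =====
-- def split_string_into_columns(string, key_size):
--     return {j: string[j - 1::key_size] for j in range(1, key_size + 1)}
-- ===== Notes on version B (the rewrite author's own statement) =====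
-- stated objective: idiomatic
-- what changed: B builds each column directly with one strided slice string[j-1::key_size] per column (a dict comprehension) instead of A's per-character scan dispatching on (i+1) % key_size; the slices run at C speed, a constant-factor win.
import Mathlib
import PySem

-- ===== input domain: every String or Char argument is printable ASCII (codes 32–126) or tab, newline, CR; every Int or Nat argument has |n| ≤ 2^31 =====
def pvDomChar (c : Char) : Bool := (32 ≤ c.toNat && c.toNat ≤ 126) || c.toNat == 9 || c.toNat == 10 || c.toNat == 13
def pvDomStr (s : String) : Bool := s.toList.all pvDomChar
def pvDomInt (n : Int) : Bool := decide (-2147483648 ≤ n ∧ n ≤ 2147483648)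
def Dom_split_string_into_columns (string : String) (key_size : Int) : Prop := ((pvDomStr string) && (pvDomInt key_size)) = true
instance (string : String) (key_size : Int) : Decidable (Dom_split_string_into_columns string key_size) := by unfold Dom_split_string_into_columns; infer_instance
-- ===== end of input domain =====

-- ===== PORT A =====
-- Header: B replaces A's per-character modulo dispatch by one strided slice per column
-- (idiomatic dict comprehension); equivalence is about the return value only.
def split_string_into_columns (string : String) (key_size : Int) : List (Int × String) :=
  let cs := string.toList
  let d0 : PySem.Dict Int (List Char) :=
    (PySem.List.pyRange 1 (key_size + 1) 1).foldl (fun d i => d.insert i ([] : List Char)) PySem.Dict.empty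
  let d1 := (PySem.List.pyRange 0 (PySem.List.len cs) 1).foldl (fun d i =>
      if PySem.Int.mod (i + 1) key_size == 0
      then d.modify key_size [] (fun v => v ++ [PySem.List.pyGetD cs i ' '])
      else d.modify (PySem.Int.mod (i + 1) key_size) [] (fun v => v ++ [PySem.List.pyGetD cs i ' '])) d0
  d1.items.map (fun p => (p.1, String.ofList p.2))

-- ===== PORT B =====
def split_string_into_columns_alt (string : String) (key_size : Int) : List (Int × String) :=
  (PySem.List.pyRange 1 (key_size + 1) 1).map (fun j =>
    (j, String.ofList ((PySem.List.slice? string.toList (some (j - 1)) none key_size).getD [])))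

-- ===== PRECONDITION & SPEC =====
-- Pre_ excludes exactly the inputs where A raises: a non-empty string with key_size <= 0
-- (ZeroDivisionError for key_size = 0, KeyError for negative key_size).
def Pre_split_string_into_columns (string : String) (key_size : Int) : Prop :=
  1 ≤ key_size ∨ string = ""
instance (string : String) (key_size : Int) : Decidable (Pre_split_string_into_columns string key_size) := by unfold Pre_split_string_into_columns; infer_instance

def pvWitness_split_string_into_columns : String × Int := ("attackatdawn", 3)

def Spec_split_string_into_columns (string : String) (key_size : Int) (out : List (Int × String)) : Prop := out = split_string_into_columns_alt string key_size
instance (string : String) (key_size : Int) (out : List (Int × String)) : Decidable (Spec_split_string_into_columns string key_size out) := by unfold Spec_split_string_into_columns; infer_instance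

-- ===== CLAIM (what is proved, stated in full; the proofs are below) =====
def Claim_equal_split_string_into_columns : Prop := ∀ (string : String) (key_size : Int), Dom_split_string_into_columns string key_size → Pre_split_string_into_columns string key_size → Spec_split_string_into_columns string key_size (split_string_into_columns string key_size)
-- ===== LEMMAS AND PROOFS =====

lemma pvFilterMap_eq_map {α β : Type} (l : List α) (f : α → Option β) (g : α → β)
    (h : ∀ x ∈ l, f x = some (g x)) : l.filterMap f = l.map g := by
  induction l with
  | nil => rfl
  | cons x xs ih =>
    simp only [List.filterMap_cons, h x (by simp), List.map_cons]
    rw [ih (fun y hy => h y (by simp [hy]))]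

lemma pvPairwise_lt_pyRange_pos (s n ks : Int) (hks : 0 < ks) :
    (PySem.List.pyRange s n ks).Pairwise (· < ·) := by
  rw [PySem.List.pyRange_of_pos _ _ hks]
  exact (List.pairwise_lt_range).map _ (fun k k' hk => by
    have : (k:Int) < k' := by exact_mod_cast hk
    nlinarith)

lemma pvRange_step_eq_filter (n a ks : Int) (ha : 0 ≤ a) (hak : a < ks) :
    PySem.List.pyRange (min a n) n ks =
      (PySem.List.pyRange 0 n 1).filter (fun i => PySem.Int.mod i ks == a) := by
  have hks : (0:Int) < ks := by omega
  have haa : a % ks = a := Int.emod_eq_of_lt ha hak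
  apply List.eq_of_perm_of_sorted (le := (· < ·)) (fun a b _ _ h1 h2 => absurd h2 (by omega))
  · exact pvPairwise_lt_pyRange_pos _ _ _ hks
  · exact (PySem.List.pairwise_lt_pyRange_one 0 n).filter _
  · rw [List.perm_ext_iff_of_nodup
      ((pvPairwise_lt_pyRange_pos _ _ _ hks).imp ne_of_lt)
      (((PySem.List.pairwise_lt_pyRange_one 0 n).filter _).imp ne_of_lt)]
    intro x
    rw [PySem.List.mem_pyRange_iff_of_pos hks, List.mem_filter, PySem.List.mem_pyRange_one]
    rw [PySem.Int.mod_eq_emod_of_pos hks]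
    simp only [beq_iff_eq]
    constructor
    · rintro ⟨h1, h2, h3⟩
      by_cases han : a ≤ n
      · have hmin : min a n = a := by omega
        rw [hmin] at h1 h3
        have h4 : (x - a) % ks = 0 := Int.emod_eq_zero_of_dvd h3
        have h5 : x % ks = a % ks := Int.emod_eq_emod_iff_emod_sub_eq_zero.mpr h4
        exact ⟨⟨by omega, h2⟩, h5.trans haa⟩
      · have : min a n = n := by omega
        omega
    · rintro ⟨⟨h1, h2⟩, h3⟩
      have hd := Int.mul_ediv_add_emod x ks
      have hq : 0 ≤ x / ks := Int.ediv_nonneg h1 hks.le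
      have hqq : 0 ≤ ks * (x / ks) := mul_nonneg hks.le hq
      have hax : a ≤ x := by omega
      have hmin : min a n = a := by omega
      rw [hmin]
      refine ⟨by omega, h2, Int.dvd_of_emod_eq_zero ?_⟩
      rw [← Int.emod_eq_emod_iff_emod_sub_eq_zero, haa]
      exact h3

lemma pvSlice_eq (cs : List Char) (a ks : Int) (ha : 0 ≤ a) (hks : 0 < ks) :
    PySem.List.slice? cs (some a) none ks =
      some ((PySem.List.pyRange (min a (cs.length : Int)) (cs.length : Int) ks).filterMap
        (fun i => cs[i.toNat]?)) := by
  rw [PySem.List.pyRange_of_pos _ _ hks, List.filterMap_map]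
  unfold PySem.List.slice? PySem.List.sliceIndices
  simp only [if_neg (by omega : ¬ ks = 0), if_neg (by omega : ¬ ks < 0),
    if_neg (by omega : ¬ a < 0), if_pos hks, Function.comp_def]

def pvCol (cs : List Char) (ks a : Int) : List Char :=
  ((PySem.List.pyRange 0 (PySem.List.len cs) 1).filter (fun i => PySem.Int.mod i ks == a)).map
    (fun i => PySem.List.pyGetD cs i ' ')

lemma pvColB (cs : List Char) (a ks : Int) (ha : 0 ≤ a) (hak : a < ks) :
    (PySem.List.slice? cs (some a) none ks).getD [] = pvCol cs ks a := by
  have hks : (0:Int) < ks := by omega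
  rw [pvSlice_eq cs a ks ha hks, Option.getD_some, pvCol,
    ← pvRange_step_eq_filter _ _ _ ha hak]
  apply pvFilterMap_eq_map
  intro i hi
  rw [PySem.List.mem_pyRange_iff_of_pos hks] at hi
  have h0 : 0 ≤ i := le_trans (le_min ha (Int.natCast_nonneg _)) hi.1
  have h1 : i < (cs.length : Int) := hi.2.1
  rw [PySem.List.pyGetD_eq_getElem cs ' ' h0 h1]
  exact List.getElem?_eq_getElem (by omega)

def pvKeyOf (ks i : Int) : Int :=
  if PySem.Int.mod (i + 1) ks == 0 then ks else PySem.Int.mod (i + 1) ks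

lemma pvKeyOf_eq_iff (ks i j : Int) (hks : 1 ≤ ks) :
    (pvKeyOf ks i == j) = (PySem.Int.mod i ks == j - 1) := by
  have hpos : (0:Int) < ks := by omega
  unfold pvKeyOf
  rw [PySem.Int.mod_eq_emod_of_pos hpos, PySem.Int.mod_eq_emod_of_pos hpos]
  have h0 : 0 ≤ i % ks := Int.emod_nonneg i (by omega)
  have h1 : i % ks < ks := Int.emod_lt_of_pos i hpos
  have hstep : (i + 1) % ks = (i % ks + 1) % ks := (Int.emod_add_emod i ks 1).symm
  rw [hstep]
  by_cases hc : i % ks + 1 = ks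
  · rw [hc, Int.emod_self]
    rw [Bool.eq_iff_iff]
    simp only [beq_self_eq_true, if_true, beq_iff_eq]
    omega
  · rw [Int.emod_eq_of_lt (by omega) (by omega), if_neg (by simp only [beq_iff_eq]; omega)]
    rw [Bool.eq_iff_iff]
    simp only [beq_iff_eq]
    omega

lemma pvKeyOf_mem (ks i : Int) (hks : 1 ≤ ks) :
    pvKeyOf ks i ∈ PySem.List.pyRange 1 (ks + 1) 1 := by
  have hpos : (0:Int) < ks := by omega
  rw [PySem.List.mem_pyRange_one]
  unfold pvKeyOf
  have h0 := PySem.Int.mod_nonneg (i + 1) hpos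
  have h1 := PySem.Int.mod_lt (i + 1) hpos
  by_cases hc : (PySem.Int.mod (i + 1) ks == 0) = true
  · rw [if_pos hc]; omega
  · rw [if_neg hc]
    simp only [beq_iff_eq] at hc
    omega

lemma pvUpdate_self {α : Type} [BEq α] [LawfulBEq α] (s : PySem.Set α) (xs : List α)
    (h : ∀ x ∈ xs, x ∈ s) : PySem.Set.update s xs = s := by
  rw [PySem.Set.update_eq_append_filter]
  have : (PySem.Set.ofList xs).filter (fun y => !s.contains y) = [] := by
    rw [List.filter_eq_nil_iff]
    intro y hy
    have hys : y ∈ s := h y ((PySem.Set.mem_ofList xs y).mp hy)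
    simpa using hys
  rw [this, List.append_nil]

lemma pvA_eq (string : String) (key_size : Int) (h : 1 ≤ key_size) :
    split_string_into_columns string key_size =
      (PySem.List.pyRange 1 (key_size + 1) 1).map
        (fun j => (j, String.ofList (pvCol string.toList key_size (j - 1)))) := by
  unfold split_string_into_columns
  dsimp only
  set cs := string.toList with hcs
  set ks := key_size with hks
  set r := PySem.List.pyRange 1 (ks + 1) 1 with hr
  -- d0
  set d0 : PySem.Dict Int (List Char) :=
    r.foldl (fun d i => d.insert i ([] : List Char)) PySem.Dict.empty with hd0
  have hnodr : r.Nodup := PySem.List.nodup_pyRange_one 1 (ks + 1)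
  have hitems0 : d0.items = r.map (fun j => (j, ([] : List Char))) := by
    rw [hd0]
    have h2 := PySem.Dict.items_foldl_insert_fresh r (fun i => i) (fun _ => ([] : List Char))
      PySem.Dict.empty (fun a _ => PySem.Dict.contains_empty a) (by rw [List.map_id']; exact hnodr)
    exact h2
  have hkeys0 : d0.keys = r := by
    show d0.items.map (·.1) = r
    rw [hitems0, List.map_map]
    exact List.map_id' r
  have hgetD0 : ∀ j, d0.getD j [] = [] := by
    intro j
    by_cases hj : j ∈ r
    · exact PySem.Dict.getD_of_mem_items d0 (by rw [hitems0]; exact List.mem_map_of_mem hj)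
        (by rw [hkeys0]; exact hnodr) []
    · refine PySem.Dict.getD_of_not_contains d0 [] ?_
      rw [← Bool.not_eq_true]
      intro hc
      exact hj (hkeys0 ▸ (PySem.Dict.contains_iff_mem_keys d0 j).mp hc)
  -- rewrite the loop body
  have hbody : (fun (d : PySem.Dict Int (List Char)) (i : Int) =>
      if PySem.Int.mod (i + 1) ks == 0
      then d.modify ks [] (fun v => v ++ [PySem.List.pyGetD cs i ' '])
      else d.modify (PySem.Int.mod (i + 1) ks) [] (fun v => v ++ [PySem.List.pyGetD cs i ' ']))
      = (fun d i => d.modify (pvKeyOf ks i) [] (fun v => v ++ [PySem.List.pyGetD cs i ' '])) := by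
    funext d i
    unfold pvKeyOf
    by_cases hc : (PySem.Int.mod (i + 1) ks == 0) = true
    · rw [if_pos hc, if_pos hc]
    · rw [if_neg hc, if_neg hc]
  rw [hbody]
  -- turn the index loop into a loop over (enumerate cs).map
  have hloop : (PySem.List.pyRange 0 (PySem.List.len cs) 1).foldl
      (fun d i => d.modify (pvKeyOf ks i) [] (fun v => v ++ [PySem.List.pyGetD cs i ' '])) d0
      = ((PySem.List.enumerate cs 0).map (fun p => (pvKeyOf ks p.1, p.2))).foldl
          (fun (d : PySem.Dict Int (List Char)) p => d.modify p.1 [] (fun v => v ++ [p.2])) d0 := by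
    rw [List.foldl_map, PySem.List.enumerate_eq_map_pyRange cs ' ', List.foldl_map]
  rw [hloop]
  set l := (PySem.List.enumerate cs 0).map (fun p => (pvKeyOf ks p.1, p.2)) with hl
  set d1 := l.foldl (fun (d : PySem.Dict Int (List Char)) p => d.modify p.1 [] (fun v => v ++ [p.2])) d0 with hd1
  have hkeys1 : d1.keys = r := by
    rw [hd1]
    rw [PySem.Dict.keys_foldl_modify_key l (fun p => p.1) [] (fun _ p v => v ++ [p.2]) d0]
    rw [hkeys0]
    apply pvUpdate_self
    intro x hx
    rw [hl] at hx
    simp only [List.map_map, List.mem_map] at hx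
    obtain ⟨p, _, hp⟩ := hx
    rw [← hp]
    exact pvKeyOf_mem ks p.1 h
  have hnod1 : d1.keys.Nodup := hkeys1 ▸ hnodr
  rw [PySem.Dict.items_eq_map_keys d1 hnod1 [], hkeys1, List.map_map]
  apply List.map_congr_left
  intro j hj
  simp only [Function.comp]
  congr 1
  -- getD d1 j [] = pvCol cs ks (j-1)
  rw [hd1, PySem.Dict.getD_foldl_modify_append l d0 j, hgetD0 j, List.nil_append, hl,
    List.filter_map, List.map_map]
  have hpred : ((fun p => p.1 == j) ∘ (fun (p : Int × Char) => (pvKeyOf ks p.1, p.2)))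
      = (fun (p : Int × Char) => PySem.Int.mod p.1 ks == j - 1) := by
    funext p
    exact pvKeyOf_eq_iff ks p.1 j h
  rw [hpred, PySem.List.enumerate_eq_map_pyRange cs ' ', List.filter_map, List.map_map]
  rfl

lemma pvB_eq (string : String) (key_size : Int) (_h : 1 ≤ key_size) :
    split_string_into_columns_alt string key_size =
      (PySem.List.pyRange 1 (key_size + 1) 1).map
        (fun j => (j, String.ofList (pvCol string.toList key_size (j - 1)))) := by
  unfold split_string_into_columns_alt
  apply List.map_congr_left
  intro j hj
  rw [PySem.List.mem_pyRange_one] at hj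
  rw [pvColB string.toList (j - 1) key_size (by omega) (by omega)]

-- ===== VERDICT (by name: the statement is the Claim_ definition above) =====
theorem split_string_into_columns_spec : Claim_equal_split_string_into_columns := by
  intro s ks _ hpre
  unfold Spec_split_string_into_columns
  rcases hpre with h | h
  · rw [pvA_eq s ks h, pvB_eq s ks h]
  · subst h
    by_cases h1 : 1 ≤ ks
    · rw [pvA_eq _ ks h1, pvB_eq _ ks h1]
    · simp [split_string_into_columns, split_string_into_columns_alt,
        PySem.List.pyRange_one_eq_nil (by omega : ks + 1 ≤ 1), PySem.List.len, PySem.Dict.empty]
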